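-- pv_equiv track=rewrite | github.com/devrimcavusoglu/acl-bib-overleaf | split_bib.py | combine_at_items
-- ===== SOURCE A (Python) =====
-- def combine_at_items(split_list):
--     """Combines bibtex entries starting with '@' with the next item.
--
--     Args:
--         split_list: A list of string bibtex lines.
--
--     Returns:
--         A new list with combined items.
--     """
--
--     combined_list = []
--     i = 0
--     while i < len(split_list):
--         if split_list[i].startswith('@'):
--             # Combine the current item with the next one if it exists
--             if i + 1 < len(split_list):
--                 combined_item = split_list[i] + split_list[i + 1]
--                 combined_list.append(combined_item)
--                 i += 2
--             else:
--                 combined_list.append(split_list[i])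
--                 i += 1
--         else:
--             combined_list.append(split_list[i])
--             i += 1
--     return combined_list
-- ===== SOURCE B (Python) =====
-- def combine_at_items(split_list):
--     """Combines bibtex entries starting with '@' with the next item.
--
--     Two staged passes with a closed-form consumption rule: an element is
--     absorbed into its predecessor exactly when the run of consecutive
--     '@'-prefixed elements immediately before it has odd length.
--     """
--     n = len(split_list)
--     flags = [s.startswith('@') for s in split_list]
--     runs = []          # runs[i] = length of the '@' run immediately before index i
--     r = 0
--     for f in flags:
--         runs.append(r)
--         r = r + 1 if f else 0
--     out = []
--     for i in range(n):
--         if runs[i] % 2 == 0:                     # not absorbed: this index survives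
--             if flags[i] and i + 1 < n:
--                 out.append(split_list[i] + split_list[i + 1])
--             else:
--                 out.append(split_list[i])
--     return out
-- ===== Notes on version B (the rewrite author's own statement) =====
-- stated objective: alternative
-- what changed: Replaced A's stateful lookahead loop (index advanced by 1 or 2) by a closed-form consumption rule computed in two staged passes: pass 1 records for each index the length of the run of consecutive '@'-prefixed predecessors, pass 2 emits exactly the indices where that run length is even (odd means the element was absorbed), merging with the successor when flagged.
import Mathlib
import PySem

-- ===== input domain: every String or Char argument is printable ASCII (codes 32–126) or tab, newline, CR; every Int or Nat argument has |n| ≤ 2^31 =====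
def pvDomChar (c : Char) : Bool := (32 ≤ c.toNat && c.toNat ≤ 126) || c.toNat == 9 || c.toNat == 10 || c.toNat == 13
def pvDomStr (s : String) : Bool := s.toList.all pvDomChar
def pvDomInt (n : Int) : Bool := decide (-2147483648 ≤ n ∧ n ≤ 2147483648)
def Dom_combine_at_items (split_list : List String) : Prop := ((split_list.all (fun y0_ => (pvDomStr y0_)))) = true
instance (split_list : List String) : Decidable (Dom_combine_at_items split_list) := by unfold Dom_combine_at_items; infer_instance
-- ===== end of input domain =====

-- B replaces A's stateful lookahead loop by a two-pass closed-form rule (an element is absorbed iff the '@'-run before it has odd length); same return value, no speed claim.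
-- ===== PORT A =====
-- A's while loop: index i, accumulator combined_list; terminates because len - i shrinks
def combineA_loop (l : List String) (i : Nat) (acc : List String) : List String :=
  if h : i < l.length then
    if PySem.Str.startswith l[i] "@" then
      if h2 : i + 1 < l.length then
        combineA_loop l (i + 2) (acc ++ [l[i] ++ l[i + 1]])
      else
        combineA_loop l (i + 1) (acc ++ [l[i]])
    else
      combineA_loop l (i + 1) (acc ++ [l[i]])
  else acc
termination_by l.length - i

def combine_at_items (split_list : List String) : List String :=
  combineA_loop split_list 0 []

-- ===== PORT B =====
-- pass 1 of Source B: running counter r of consecutive '@' flags, appended before updating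
def runsOf (flags : List Bool) (r : Nat) : List Nat :=
  match flags with
  | [] => []
  | f :: fs => r :: runsOf fs (if f then r + 1 else 0)

-- pass 2 of Source B: for i in range(n): if runs[i] % 2 == 0: append (merged or plain)
def emitLoop (l : List String) (flags : List Bool) (runs : List Nat) (i : Nat) (acc : List String) : List String :=
  if i < l.length then
    if runs.getD i 0 % 2 == 0 then
      if flags.getD i false && decide (i + 1 < l.length) then
        emitLoop l flags runs (i + 1) (acc ++ [l.getD i "" ++ l.getD (i + 1) ""])
      else
        emitLoop l flags runs (i + 1) (acc ++ [l.getD i ""])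
    else
      emitLoop l flags runs (i + 1) acc
  else acc
termination_by l.length - i

def combine_at_items_alt (split_list : List String) : List String :=
  let flags := split_list.map (fun s => PySem.Str.startswith s "@")
  emitLoop split_list flags (runsOf flags 0) 0 []

-- ===== PRECONDITION & SPEC =====
def Spec_combine_at_items (split_list : List String) (out : List String) : Prop := out = combine_at_items_alt split_list
instance (split_list : List String) (out : List String) : Decidable (Spec_combine_at_items split_list out) := by unfold Spec_combine_at_items; infer_instance

-- ===== CLAIM (what is proved, stated in full; the proofs are below) =====
def Claim_equal_combine_at_items : Prop := ∀ (split_list : List String), Dom_combine_at_items split_list → Spec_combine_at_items split_list (combine_at_items split_list)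

-- ===== LEMMAS AND PROOFS =====

theorem runsOf_length (fs : List Bool) : ∀ r, (runsOf fs r).length = fs.length := by
  induction fs with
  | nil => intro r; simp [runsOf]
  | cons f fs ih => intro r; simp [runsOf, ih]

theorem runsOf_getD_zero (fs : List Bool) (r : Nat) (h : fs ≠ []) :
    (runsOf fs r).getD 0 0 = r := by
  cases fs with
  | nil => exact absurd rfl h
  | cons f fs => simp [runsOf]

theorem runsOf_getD_succ (fs : List Bool) : ∀ (r i : Nat), i + 1 < fs.length →
    (runsOf fs r).getD (i + 1) 0 =
      if fs.getD i false then (runsOf fs r).getD i 0 + 1 else 0 := by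
  induction fs with
  | nil => intro r i h; simp at h
  | cons f fs ih =>
    intro r i h
    cases i with
    | zero =>
      have hne : fs ≠ [] := by
        intro hnil; subst hnil; simp at h
      simp only [runsOf, List.getD_cons_succ, List.getD_cons_zero]
      exact runsOf_getD_zero fs _ hne
    | succ j =>
      simp only [runsOf, List.getD_cons_succ]
      exact ih _ j (by simpa using h)

-- out-of-range getD on runs is 0 (even), used at loop exit and after a merge at the boundary
theorem runs_getD_ge (fs : List Bool) (r i : Nat) (h : fs.length ≤ i) :
    (runsOf fs r).getD i 0 = 0 := by
  apply List.getD_eq_default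
  rw [runsOf_length]; omega

theorem flags_getD (l : List String) (i : Nat) (h : i < l.length) :
    (l.map (fun s => PySem.Str.startswith s "@")).getD i false
      = PySem.Str.startswith l[i] "@" := by
  rw [List.getD_eq_getElem?_getD, List.getElem?_map]
  simp [List.getElem?_eq_getElem h]

theorem key : ∀ (n : ℕ) (l : List String) (i : Nat) (acc : List String),
    l.length ≤ i + n →
    (runsOf (l.map (fun s => PySem.Str.startswith s "@")) 0).getD i 0 % 2 = 0 →
    combineA_loop l i acc
      = emitLoop l (l.map (fun s => PySem.Str.startswith s "@"))
          (runsOf (l.map (fun s => PySem.Str.startswith s "@")) 0) i acc := by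
  intro n
  induction n with
  | zero =>
    intro l i acc h _
    have hge : ¬ i < l.length := by omega
    rw [combineA_loop, emitLoop, dif_neg hge, if_neg hge]
  | succ n ih =>
    intro l i acc h heven
    set flags := l.map (fun s => PySem.Str.startswith s "@") with hflags
    set runs := runsOf flags 0 with hruns
    by_cases hi : i < l.length
    · have hflen : flags.length = l.length := by rw [hflags, List.length_map]
      have hfi : flags.getD i false = PySem.Str.startswith l[i] "@" := flags_getD l i hi
      have hevenb : (runs.getD i 0 % 2 == 0) = true := by
        simp only [beq_iff_eq]; exact heven
      rw [combineA_loop, emitLoop, dif_pos hi, if_pos hi, if_pos hevenb]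
      by_cases hs : PySem.Str.startswith l[i] "@" = true
      · rw [if_pos hs]
        by_cases h2 : i + 1 < l.length
        · -- merge branch: A jumps to i+2; B emits at i, then skips the odd index i+1
          have hcond : (flags.getD i false && decide (i + 1 < l.length)) = true := by
            rw [hfi, hs, Bool.true_and]; exact decide_eq_true h2
          rw [dif_pos h2, if_pos hcond,
              List.getD_eq_getElem l "" hi, List.getD_eq_getElem l "" h2]
          have hodd : runs.getD (i + 1) 0 = runs.getD i 0 + 1 := by
            rw [hruns, runsOf_getD_succ flags 0 i (by omega), hfi, hs, if_pos rfl]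
          have hoddne : ¬ ((runs.getD (i + 1) 0 % 2 == 0) = true) := by
            rw [hodd]; simp only [beq_iff_eq]; omega
          rw [emitLoop, if_pos h2, if_neg hoddne]
          have heven2 : runs.getD (i + 2) 0 % 2 = 0 := by
            by_cases h3 : i + 2 < l.length
            · rw [hruns, runsOf_getD_succ flags 0 (i + 1) (by omega)]
              split
              · rw [← hruns, hodd]; omega
              · rfl
            · rw [hruns, runs_getD_ge flags 0 (i + 2) (by omega)]
          exact ih l (i + 2) _ (by omega) heven2
        · -- '@' at the last index: both append l[i] and stop one step later
          have hcond : ¬ ((flags.getD i false && decide (i + 1 < l.length)) = true) := by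
            rw [decide_eq_false h2, Bool.and_false]; exact Bool.false_ne_true
          rw [dif_neg h2, if_neg hcond, List.getD_eq_getElem l "" hi]
          have heven1 : runs.getD (i + 1) 0 % 2 = 0 := by
            rw [hruns, runs_getD_ge flags 0 (i + 1) (by omega)]
          exact ih l (i + 1) _ (by omega) heven1
      · -- non-'@': both append l[i] and move on; the run resets to 0
        have hs' : PySem.Str.startswith l[i] "@" = false := by simpa using hs
        have hcond : ¬ ((flags.getD i false && decide (i + 1 < l.length)) = true) := by
          rw [hfi, hs', Bool.false_and]; exact Bool.false_ne_true
        rw [if_neg hs, if_neg hcond, List.getD_eq_getElem l "" hi]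
        have heven1 : runs.getD (i + 1) 0 % 2 = 0 := by
          by_cases h2 : i + 1 < l.length
          · rw [hruns, runsOf_getD_succ flags 0 i (by omega), hfi, hs', if_neg (by simp)]
          · rw [hruns, runs_getD_ge flags 0 (i + 1) (by omega)]
        exact ih l (i + 1) _ (by omega) heven1
    · rw [combineA_loop, emitLoop, dif_neg hi, if_neg hi]

-- ===== VERDICT (by name: the statement is the Claim_ definition above) =====
theorem combine_at_items_spec : Claim_equal_combine_at_items := by
  intro l _
  unfold Spec_combine_at_items combine_at_items combine_at_items_alt
  apply key l.length l 0 [] (by omega)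
  cases hl : l with
  | nil => simp [runsOf]
  | cons a t =>
    rw [List.map_cons, runsOf_getD_zero _ _ (by simp)]
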